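-- pv_equiv track=rewrite | github.com/PokamCedric/eraser-ts | python_test/algo7.py | reorder_layers_by_cluster
-- ===== SOURCE A (Python) =====
-- def reorder_layers_by_cluster(layers, relations, entity_order):
--     """
--     Réorganise l'ordre vertical des entités dans chaque layer pour aligner
--     les clusters visuellement (entités pointant vers la même cible sont regroupées)
--     """
--     if not layers:
--         return layers
--
--     # Dernier layer: ordre selon entity_order
--     last_layer_idx = len(layers) - 1
--     last_layer = layers[last_layer_idx]
--
--     ordered_last = []
--     for entity in entity_order:
--         if entity in last_layer:
--             ordered_last.append(entity)
--
--     for entity in last_layer: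
--         if entity not in ordered_last:
--             ordered_last.append(entity)
--
--     layers[last_layer_idx] = ordered_last
--
--     # Autres layers de droite à gauche
--     for layer_idx in range(len(layers) - 2, -1, -1):
--         current_layer = layers[layer_idx]
--         next_layer = layers[layer_idx + 1]
--
--         # Trouver les cibles pour chaque entité
--         entity_to_all_targets = {}
--         for entity in current_layer:
--             targets = []
--             for a, b in relations:
--                 if a == entity and b in next_layer:
--                     targets.append(b)
--             entity_to_all_targets[entity] = targets
--
--         # Grouper les entités par leur cible principale (première cible ou None)
--         # Ceci garantit que les entités pointant vers la même cible restent groupées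
--         entity_primary_target = {}
--         for entity in current_layer:
--             targets = entity_to_all_targets[entity]
--             if targets:
--                 # Prendre la première cible comme cible principale (ou celle avec position min)
--                 primary = min(targets, key=lambda t: next_layer.index(t))
--                 entity_primary_target[entity] = primary
--             else:
--                 entity_primary_target[entity] = None
--
--         # Calculer position de la cible principale
--         entity_target_pos = {}
--         for entity in current_layer:
--             primary = entity_primary_target[entity]
--             if primary is None:
--                 entity_target_pos[entity] = -1
--             else:
--                 entity_target_pos[entity] = next_layer.index(primary)
--
--         # Grouper les entités par leur cible principale
--         # Créer des groupes: {target: [entities]}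
--         target_groups = {}
--         for entity in current_layer:
--             primary = entity_primary_target[entity]
--             if primary not in target_groups:
--                 target_groups[primary] = []
--             target_groups[primary].append(entity)
--
--         # Trier chaque groupe par entity_order
--         for target in target_groups:
--             target_groups[target] = sorted(target_groups[target], key=lambda e: (
--                 entity_order.index(e) if e in entity_order else 999
--             ))
--
--         # Ordonner les groupes par position de leur cible dans next_layer
--         # Les entités sans cible (None) vont en premier
--         ordered_targets = sorted(target_groups.keys(), key=lambda t: (
--             next_layer.index(t) if t is not None else -1
--         ))
--
--         # Construire la liste finale
--         ordered_layer = []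
--         for target in ordered_targets:
--             ordered_layer.extend(target_groups[target])
--
--         layers[layer_idx] = ordered_layer
--
--     return layers
-- ===== SOURCE B (Python) =====
-- def reorder_layers_by_cluster(layers, relations, entity_order):
--     """Same reordering, one stable tuple-key sort per layer with precomputed
--     index dicts instead of grouping dicts and repeated list.index scans."""
--     if not layers:
--         return layers
--
--     last = layers[-1]
--     kept = [e for e in entity_order if e in last]
--     seen = set(kept)
--     tail = []
--     for e in last:
--         if e not in seen:
--             seen.add(e)
--             tail.append(e)
--     layers[-1] = kept + tail
--
--     rel_by_src = {}
--     for a, b in relations: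
--         rel_by_src.setdefault(a, []).append(b)
--     ord_idx = {}
--     for i, e in enumerate(entity_order):
--         ord_idx.setdefault(e, i)
--
--     for idx in range(len(layers) - 2, -1, -1):
--         nxt = layers[idx + 1]
--         pos = {}
--         for i, e in enumerate(nxt):
--             pos.setdefault(e, i)
--
--         def keypos(e):
--             ps = [pos[t] for t in rel_by_src.get(e, []) if t in pos]
--             return min(ps) if ps else -1
--
--         layers[idx] = sorted(layers[idx],
--                              key=lambda e: (keypos(e), ord_idx.get(e, 999)))
--     return layers
-- ===== Notes on version B (the rewrite author's own statement) =====
-- stated objective: faster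
-- what changed: Per layer, A builds three per-entity dicts plus grouping dicts and calls next_layer.index / entity_order.index inside inner loops (rescanning relations and lists per entity); B precomputes first-index dicts for entity_order and each next layer and a relations-by-source dict once, then produces each layer with a single stable sort under the tuple key (position of primary target, entity-order rank), which provably equals A's group-concatenation.
import Mathlib
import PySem

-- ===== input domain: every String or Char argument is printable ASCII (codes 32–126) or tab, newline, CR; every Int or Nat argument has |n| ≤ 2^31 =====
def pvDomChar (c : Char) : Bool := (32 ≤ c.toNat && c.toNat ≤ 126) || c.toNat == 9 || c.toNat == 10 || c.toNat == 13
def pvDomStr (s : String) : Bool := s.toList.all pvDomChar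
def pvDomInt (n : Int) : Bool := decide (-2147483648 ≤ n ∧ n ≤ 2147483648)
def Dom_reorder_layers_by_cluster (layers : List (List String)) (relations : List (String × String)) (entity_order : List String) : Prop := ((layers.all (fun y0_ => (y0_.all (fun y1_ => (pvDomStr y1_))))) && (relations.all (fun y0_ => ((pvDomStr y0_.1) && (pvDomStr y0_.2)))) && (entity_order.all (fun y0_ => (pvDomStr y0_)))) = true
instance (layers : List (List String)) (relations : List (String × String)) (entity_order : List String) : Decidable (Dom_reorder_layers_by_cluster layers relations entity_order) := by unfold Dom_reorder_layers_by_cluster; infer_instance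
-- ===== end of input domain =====

-- B replaces A's per-layer grouping dicts and repeated list.index scans by one stable
-- tuple-key sort per layer over precomputed index dictionaries (objective: faster).
-- Both A and B mutate `layers` in place in Python (same element assignments); the
-- equivalence proved here is about the returned value.

-- ===== PORT A =====

-- key used by A to sort each group: entity_order.index(e) if e in entity_order else 999
def pvA_entityKey (entity_order : List String) (e : String) : Int :=
  if e ∈ entity_order then ((PySem.List.index? entity_order e).getD 0 : Nat) else 999

-- body of A's right-to-left loop for one layer_idx (current_layer, next_layer read from layers)
def pvA_layerStep (relations : List (String × String)) (entity_order : List String)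
    (current_layer next_layer : List String) : List String :=
  let entity_to_all_targets : PySem.Dict String (List String) :=
    current_layer.foldl (fun d entity =>
      d.insert entity (relations.foldl (fun targets p =>
        if p.1 = entity ∧ p.2 ∈ next_layer then targets ++ [p.2] else targets) []))
      PySem.Dict.empty
  let entity_primary_target : PySem.Dict String (Option String) :=
    current_layer.foldl (fun d entity =>
      let targets := entity_to_all_targets.getD entity []  -- key always present: getD exact for d[k]
      if targets ≠ [] then
        -- min(targets, key=lambda t: next_layer.index(t)); index() never raises: targets ⊆ next_layer
        d.insert entity (PySem.List.min? targets (fun t => (PySem.List.index? next_layer t).getD 0))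
      else d.insert entity none) PySem.Dict.empty
  -- entity_target_pos: computed by A but never used afterwards (dead also in the Python)
  let _entity_target_pos : PySem.Dict String Int :=
    current_layer.foldl (fun d entity =>
      match entity_primary_target.getD entity none with
      | none => d.insert entity (-1)
      | some primary => d.insert entity ((PySem.List.index? next_layer primary).getD 0 : Nat))
      PySem.Dict.empty
  let target_groups : PySem.Dict (Option String) (List String) :=
    current_layer.foldl (fun d entity =>
      -- 'if primary not in target_groups: …[primary] = []' then '.append(entity)' = modify
      d.modify (entity_primary_target.getD entity none) [] (fun g => g ++ [entity]))
      PySem.Dict.empty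
  -- 'for target in target_groups: target_groups[target] = sorted(…)' rewrites every value in place
  let sorted_groups : PySem.Dict (Option String) (List String) :=
    PySem.Dict.mk (target_groups.items.map (fun p =>
      (p.1, PySem.List.sorted p.2 (pvA_entityKey entity_order) false)))
  let ordered_targets : List (Option String) :=
    PySem.List.sorted target_groups.keys (fun t => match t with
      | some s => (((PySem.List.index? next_layer s).getD 0 : Nat) : Int)
      | none => (-1 : Int)) false
  ordered_targets.foldl (fun acc t => acc ++ sorted_groups.getD t []) []

def reorder_layers_by_cluster (layers : List (List String)) (relations : List (String × String)) (entity_order : List String) : List (List String) :=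
  if layers = [] then layers
  else
    let last_layer_idx : Int := PySem.List.len layers - 1
    let last_layer := PySem.List.pyGetD layers last_layer_idx []   -- index always in range
    let ordered_last := entity_order.foldl (fun acc entity =>
      if entity ∈ last_layer then acc ++ [entity] else acc) []
    let ordered_last := last_layer.foldl (fun acc entity =>
      if entity ∉ acc then acc ++ [entity] else acc) ordered_last
    let layers1 := PySem.List.pySetD layers last_layer_idx ordered_last
    (PySem.List.pyRange (PySem.List.len layers1 - 2) (-1) (-1)).foldl
      (fun ls layer_idx =>
        PySem.List.pySetD ls layer_idx
          (pvA_layerStep relations entity_order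
            (PySem.List.pyGetD ls layer_idx [])
            (PySem.List.pyGetD ls (layer_idx + 1) [])))
      layers1

-- ===== PORT B =====

-- {e: first index of e in xs} built with setdefault over enumerate
def pvB_firstIndexDict (xs : List String) : PySem.Dict String Int :=
  (PySem.List.enumerate xs).foldl (fun d p => d.setdefault p.2 p.1) PySem.Dict.empty

-- rel_by_src.setdefault(a, []).append(b) = modify
def pvB_relBySrc (relations : List (String × String)) : PySem.Dict String (List String) :=
  relations.foldl (fun d p => d.modify p.1 [] (fun l => l ++ [p.2])) PySem.Dict.empty

-- ps = [pos[t] for t in rel_by_src.get(e, []) if t in pos]; min(ps) if ps else -1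
def pvB_keypos (rel_by_src : PySem.Dict String (List String)) (pos : PySem.Dict String Int)
    (e : String) : Int :=
  let ps := ((rel_by_src.getD e []).filter (fun t => pos.contains t)).map (fun t => pos.getD t 0)
  PySem.List.minD ps (fun x => x) (-1)

def reorder_layers_by_cluster_alt (layers : List (List String)) (relations : List (String × String)) (entity_order : List String) : List (List String) :=
  if layers = [] then layers
  else
    let last := PySem.List.pyGetD layers (-1) []
    let kept := entity_order.filter (fun e => decide (e ∈ last))
    let st := last.foldl (fun (st : PySem.Set String × List String) e =>
        if e ∈ st.1 then st else (PySem.Set.add st.1 e, st.2 ++ [e]))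
      (PySem.Set.ofList kept, [])
    let layers1 := PySem.List.pySetD layers (-1) (kept ++ st.2)
    let rel_by_src := pvB_relBySrc relations
    let ord_idx := pvB_firstIndexDict entity_order
    (PySem.List.pyRange (PySem.List.len layers1 - 2) (-1) (-1)).foldl
      (fun ls idx =>
        let nxt := PySem.List.pyGetD ls (idx + 1) []
        let pos := pvB_firstIndexDict nxt
        PySem.List.pySetD ls idx
          (PySem.List.sorted2 (PySem.List.pyGetD ls idx [])
            (pvB_keypos rel_by_src pos) (fun e => ord_idx.getD e 999) false))
      layers1

-- ===== PRECONDITION & SPEC =====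
def Spec_reorder_layers_by_cluster (layers : List (List String)) (relations : List (String × String)) (entity_order : List String) (out : List (List String)) : Prop := out = reorder_layers_by_cluster_alt layers relations entity_order
instance (layers : List (List String)) (relations : List (String × String)) (entity_order : List String) (out : List (List String)) : Decidable (Spec_reorder_layers_by_cluster layers relations entity_order out) := by unfold Spec_reorder_layers_by_cluster; infer_instance

-- ===== CLAIM (what is proved, stated in full; the proofs are below) =====
def Claim_equal_reorder_layers_by_cluster : Prop := ∀ (layers : List (List String)) (relations : List (String × String)) (entity_order : List String), Dom_reorder_layers_by_cluster layers relations entity_order → Spec_reorder_layers_by_cluster layers relations entity_order (reorder_layers_by_cluster layers relations entity_order)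

-- ===== LEMMAS AND PROOFS =====

-- ---- generic stable-sort machinery and dict plumbing ----

theorem pv_filter_insertBy {α κ : Type} [LinearOrder κ] (K : α → κ) (c : κ) (x : α) :
    ∀ (l : List α), l.Pairwise (fun a b => K a ≤ K b) →
    (PySem.List.insertBy (fun a b => decide (K a < K b)) x l).filter (fun y => decide (K y = c))
      = l.filter (fun y => decide (K y = c)) ++ if K x = c then [x] else [] := by
  intro l
  induction l with
  | nil =>
    intro _
    by_cases hc : K x = c <;> simp [PySem.List.insertBy, hc]
  | cons y t ih =>
    intro hp
    rw [PySem.List.insertBy]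
    by_cases h : K x < K y
    · simp only [h, decide_true, if_true]
      by_cases hc : K x = c
      · have ht : ∀ z ∈ y :: t, ¬ (K z = c) := by
          intro z hz hzc
          have hyz : K y ≤ K z := by
            rcases List.mem_cons.mp hz with hz | hz
            · exact le_of_eq (congrArg K hz.symm)
            · exact (List.pairwise_cons.mp hp).1 z hz
          have : K x < K z := lt_of_lt_of_le h hyz
          rw [hzc, ← hc] at this
          exact lt_irrefl _ this
        rw [List.filter_cons_of_pos (by simp [hc]),
            List.filter_eq_nil_iff.mpr (by intro z hz; simp [ht z hz])]
        simp [hc]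
      · rw [List.filter_cons_of_neg (by simp [hc])]
        simp [hc]
    · simp only [h, decide_false, Bool.false_eq_true, if_false]
      rw [List.filter_cons, List.filter_cons, ih (List.pairwise_cons.mp hp).2]
      by_cases hy : K y = c <;> simp [hy]

theorem pv_sorted_filter {α κ : Type} [LinearOrder κ] (xs : List α) (K : α → κ) (c : κ) :
    (PySem.List.sorted xs K false).filter (fun y => decide (K y = c))
      = xs.filter (fun y => decide (K y = c)) := by
  suffices h : ∀ (xs acc : List α), acc.Pairwise (fun a b => K a ≤ K b) →
      (xs.foldl (fun acc x => PySem.List.insertBy (fun a b => decide (K a < K b)) x acc)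
        acc).filter (fun y => decide (K y = c))
      = acc.filter (fun y => decide (K y = c)) ++ xs.filter (fun y => decide (K y = c)) by
    rw [PySem.List.sorted_eq_foldl_insertBy]
    simpa using h xs [] (by simp)
  intro xs
  induction xs with
  | nil => intro acc _; simp
  | cons x t ih =>
    intro acc hacc
    rw [List.foldl_cons, ih _ (PySem.List.insertBy_pairwise_le K x acc hacc),
        pv_filter_insertBy K c x acc hacc, List.filter_cons]
    by_cases h : K x = c <;> simp [h]

theorem pv_sorted_unique {α κ : Type} [LinearOrder κ] (K : α → κ) :
    ∀ (ys zs : List α), ys.Pairwise (fun a b => K a ≤ K b) → zs.Pairwise (fun a b => K a ≤ K b) →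
    (∀ c, ys.filter (fun y => decide (K y = c)) = zs.filter (fun y => decide (K y = c))) →
    ys = zs := by
  intro ys
  induction ys with
  | nil =>
    intro zs _ _ hf
    cases zs with
    | nil => rfl
    | cons z zt =>
      have h := hf (K z)
      rw [List.filter_nil, List.filter_cons_of_pos (by simp)] at h
      exact absurd h (by simp)
  | cons y yt ih =>
    intro zs hys hzs hf
    cases zs with
    | nil =>
      have h := hf (K y)
      rw [List.filter_nil, List.filter_cons_of_pos (by simp)] at h
      exact absurd h (by simp)
    | cons z zt =>
      have hy := hf (K y)
      have hz := hf (K z)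
      rw [List.filter_cons_of_pos (by simp)] at hy
      have hKzy : K z = K y := by
        by_contra hne
        rw [List.filter_cons_of_neg (by simpa using hne)] at hy
        have hyzt : y ∈ zt := by
          have : y ∈ zt.filter (fun w => decide (K w = K y)) := by
            rw [← hy]; exact List.mem_cons_self
          exact List.mem_of_mem_filter this
        have h1 : K z ≤ K y := (List.pairwise_cons.mp hzs).1 y hyzt
        rw [List.filter_cons_of_neg (by simp; exact fun h => hne h.symm), List.filter_cons_of_pos (by simp)] at hz
        have hzyt : z ∈ yt := by
          have : z ∈ yt.filter (fun w => decide (K w = K z)) := by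
            rw [hz]; exact List.mem_cons_self
          exact List.mem_of_mem_filter this
        have h2 : K y ≤ K z := (List.pairwise_cons.mp hys).1 z hzyt
        exact hne (le_antisymm h1 h2)
      rw [List.filter_cons_of_pos (by simp [hKzy])] at hy
      obtain ⟨hyz, htl⟩ := List.cons_eq_cons.mp hy
      subst hyz
      have : yt = zt := by
        refine ih zt (List.pairwise_cons.mp hys).2 (List.pairwise_cons.mp hzs).2 ?_
        intro c
        by_cases hc : c = K y
        · subst hc; exact htl
        · have h := hf c
          rwa [List.filter_cons_of_neg (by simp; exact fun h => hc h.symm),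
               List.filter_cons_of_neg (by simp; exact fun h => hc (h.symm.trans hKzy))] at h
      rw [this]

theorem pv_sorted2_eq {α : Type} (xs : List α) (k1 k2 : α → Int) :
    PySem.List.sorted2 xs k1 k2 false
      = PySem.List.sorted xs (fun x => toLex (k1 x, k2 x)) false := by
  have hbe : (fun (a b : α) => decide (k1 a < k1 b) || (!decide (k1 b < k1 a) && decide (k2 a < k2 b)))
      = (fun (a b : α) => decide ((fun x => toLex (k1 x, k2 x)) a < (fun x => toLex (k1 x, k2 x)) b)) := by
    funext a b
    rcases lt_trichotomy (k1 a) (k1 b) with h | h | h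
    · simp [Prod.Lex.lt_iff, h]
    · simp [Prod.Lex.lt_iff, h]
    · simp [Prod.Lex.lt_iff, not_lt_of_gt h, h]
      intro he
      exact absurd (he ▸ h) (lt_irrefl _)
  rw [PySem.List.sorted_eq_foldl_insertBy]
  unfold PySem.List.sorted2
  simp only [Bool.false_eq_true, if_false]
  rw [hbe]

theorem pv_get?_foldl_insert_fn {κ ν : Type} [BEq κ] [LawfulBEq κ] [DecidableEq κ] (F : κ → ν) :
    ∀ (l : List κ) (d : PySem.Dict κ ν) (e : κ),
    (l.foldl (fun d x => d.insert x (F x)) d).get? e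
      = if e ∈ l then some (F e) else d.get? e := by
  intro l
  induction l with
  | nil => intro d e; simp
  | cons x t ih =>
    intro d e
    rw [List.foldl_cons, ih]
    by_cases he : e ∈ t
    · simp [he]
    · by_cases hex : e = x
      · subst hex; simp [he, PySem.Dict.get?_insert_self]
      · simp [he, hex, PySem.Dict.get?_insert_of_ne _ _ hex]

theorem pv_get?_mk_map_values {κ ν : Type} [BEq κ] (f : ν → ν) :
    ∀ (items : List (κ × ν)) (t : κ),
    (PySem.Dict.mk (items.map (fun p => (p.1, f p.2)))).get? t
      = ((PySem.Dict.mk items).get? t).map f := by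
  intro items
  induction items with
  | nil => intro t; simp [PySem.Dict.get?]
  | cons p rest ih =>
    intro t
    rw [List.map_cons]
    rw [PySem.Dict.get?_mk_cons, PySem.Dict.get?_mk_cons]
    by_cases h : (p.1 == t) = true <;> simp [h, ih]

theorem pv_get?_enum_setdefault {α : Type} [BEq α] [LawfulBEq α] :
    ∀ (xs : List α) (s : Int) (d : PySem.Dict α Int) (v : α),
    ((PySem.List.enumerate xs s).foldl (fun d p => d.setdefault p.2 p.1) d).get? v
      = match d.get? v with
        | some w => some w
        | none => (PySem.List.index? xs v).map (fun k => s + (k : Int)) := by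
  intro xs
  induction xs with
  | nil =>
    intro s d v
    simp only [PySem.List.enumerate_nil, List.foldl_nil]
    cases d.get? v <;> simp [PySem.List.index?_eq_idxOf?, List.idxOf?_nil]
  | cons x t ih =>
    intro s d v
    rw [PySem.List.enumerate_cons, List.foldl_cons, ih]
    by_cases hxv : x = v
    · subst hxv
      rw [PySem.List.index?_cons_self]
      rw [PySem.Dict.get?_setdefault_self]
      cases hd : d.get? x <;> simp
    · rw [PySem.List.index?_cons_of_ne t hxv,
          PySem.Dict.get?_setdefault_of_ne d s (fun h => hxv h.symm)]
      cases hd : d.get? v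
      · cases hk : PySem.List.index? t v <;> simp; omega
      · simp

theorem pv_firstIndex_get? (xs : List String) (v : String) :
    (pvB_firstIndexDict xs).get? v = (PySem.List.index? xs v).map (fun k => (k : Int)) := by
  unfold pvB_firstIndexDict
  rw [pv_get?_enum_setdefault]
  simp only [PySem.Dict.get?_empty]
  cases PySem.List.index? xs v <;> simp

-- ---- last-layer step ----


theorem pv_tail_fold (kept : List String) :
    ∀ (l tail : List String) (s : PySem.Set String),
    (∀ x, x ∈ s ↔ x ∈ kept ++ tail) →
    l.foldl (fun acc e => if e ∉ acc then acc ++ [e] else acc) (kept ++ tail)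
      = kept ++ (l.foldl (fun (st : PySem.Set String × List String) e =>
          if e ∈ st.1 then st else (PySem.Set.add st.1 e, st.2 ++ [e])) (s, tail)).2 := by
  intro l
  induction l with
  | nil => intro tail s _; simp
  | cons e t ih =>
    intro tail s hs
    rw [List.foldl_cons, List.foldl_cons]
    by_cases he : e ∈ s
    · rw [if_pos he, if_neg (by simp [(hs e).mp he])]
      exact ih tail s hs
    · rw [if_neg he, if_pos (by simpa using fun h => he ((hs e).mpr h))]
      have : (kept ++ tail) ++ [e] = kept ++ (tail ++ [e]) := by simp
      rw [this]
      refine ih (tail ++ [e]) (PySem.Set.add s e) ?_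
      intro x
      rw [PySem.Set.mem_add]
      constructor
      · rintro (hx | rfl)
        · rcases List.mem_append.mp ((hs x).mp hx) with h | h
          · exact List.mem_append.mpr (Or.inl h)
          · exact List.mem_append.mpr (Or.inr (List.mem_append.mpr (Or.inl h)))
        · exact List.mem_append.mpr (Or.inr (by simp))
      · intro hx
        rcases List.mem_append.mp hx with h | h
        · exact Or.inl ((hs x).mpr (List.mem_append.mpr (Or.inl h)))
        · rcases List.mem_append.mp h with h | h
          · exact Or.inl ((hs x).mpr (List.mem_append.mpr (Or.inr h)))
          · exact Or.inr (by simpa using h)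

-- ---- per-layer equality: canonical forms ----

-- targets of e among next_layer members
def pvT (relations : List (String × String)) (nxt : List String) (e : String) : List String :=
  (relations.filter (fun p => decide (p.1 = e ∧ p.2 ∈ nxt))).map (fun p => p.2)

-- position key used on targets (next_layer.index)
def pvNKey (nxt : List String) (t : String) : Nat := (PySem.List.index? nxt t).getD 0

-- primary target of e
def pvPT (relations : List (String × String)) (nxt : List String) (e : String) : Option String :=
  PySem.List.min? (pvT relations nxt e) (pvNKey nxt)

-- group key: position of the primary target, -1 for none
def pvPK (nxt : List String) : Option String → Int
  | some s => ((pvNKey nxt s : Nat) : Int)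
  | none => -1

theorem pv_targets_fold (relations : List (String × String)) (nxt : List String) (e : String) :
    relations.foldl (fun targets p =>
        if p.1 = e ∧ p.2 ∈ nxt then targets ++ [p.2] else targets) []
      = pvT relations nxt e := by
  simpa [pvT] using
    PySem.List.foldl_append_ite (fun p : String × String => p.1 = e ∧ p.2 ∈ nxt)
      (fun p => p.2) relations []

theorem pv_ept_eq (relations : List (String × String)) (nxt cur : List String) :
    cur.foldl (fun d entity =>
      let targets := (cur.foldl (fun d entity =>
          d.insert entity (relations.foldl (fun targets p =>
            if p.1 = entity ∧ p.2 ∈ nxt then targets ++ [p.2] else targets) []))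
          PySem.Dict.empty).getD entity []
      if targets ≠ [] then
        d.insert entity (PySem.List.min? targets (fun t => (PySem.List.index? nxt t).getD 0))
      else d.insert entity none) PySem.Dict.empty
    = cur.foldl (fun d e => d.insert e (pvPT relations nxt e)) PySem.Dict.empty := by
  refine PySem.List.foldl_congr_mem cur _ _ _ ?_
  intro d e he
  have htat : (cur.foldl (fun d entity =>
      d.insert entity (relations.foldl (fun targets p =>
        if p.1 = entity ∧ p.2 ∈ nxt then targets ++ [p.2] else targets) []))
      PySem.Dict.empty).getD e [] = pvT relations nxt e := by
    rw [PySem.Dict.getD_eq_get?_getD, pv_get?_foldl_insert_fn, if_pos he, pv_targets_fold]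
    rfl
  simp only [htat]
  by_cases ht : pvT relations nxt e = []
  · rw [if_neg (by simp [ht])]
    unfold pvPT
    rw [ht]
    rfl
  · rw [if_pos (by simp [ht])]
    rfl

theorem pv_tg_eq (relations : List (String × String)) (nxt cur : List String) :
    cur.foldl (fun d entity =>
      d.modify ((cur.foldl (fun d e => d.insert e (pvPT relations nxt e))
        PySem.Dict.empty).getD entity none) [] (fun g => g ++ [entity]))
      PySem.Dict.empty
    = cur.foldl (fun d e => d.modify (pvPT relations nxt e) [] (fun g => g ++ [e]))
        PySem.Dict.empty := by
  refine PySem.List.foldl_congr_mem cur _ _ _ ?_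
  intro d e he
  rw [PySem.Dict.getD_eq_get?_getD, pv_get?_foldl_insert_fn, if_pos he]
  rfl

theorem pv_tg_getD (relations : List (String × String)) (nxt cur : List String)
    (t : Option String) :
    (cur.foldl (fun d e => d.modify (pvPT relations nxt e) [] (fun g => g ++ [e]))
        PySem.Dict.empty).getD t []
      = cur.filter (fun e => pvPT relations nxt e == t) := by
  have : cur.foldl (fun d e => d.modify (pvPT relations nxt e) [] (fun g => g ++ [e]))
        PySem.Dict.empty
      = (cur.map (fun e => (pvPT relations nxt e, e))).foldl
          (fun d p => d.modify p.1 [] (fun g => g ++ [p.2])) PySem.Dict.empty := by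
    rw [List.foldl_map]
  rw [this, PySem.Dict.getD_foldl_modify_append, PySem.Dict.getD_empty, List.filter_map]
  simp [Function.comp_def]

theorem pv_tg_keys (relations : List (String × String)) (nxt cur : List String) :
    (cur.foldl (fun d e => d.modify (pvPT relations nxt e) [] (fun g => g ++ [e]))
        PySem.Dict.empty).keys
      = PySem.Set.ofList (cur.map (pvPT relations nxt)) := by
  rw [PySem.Dict.keys_foldl_modify_key cur (fun e => pvPT relations nxt e) []
        (fun _ x => (fun g => g ++ [x])) PySem.Dict.empty]
  rw [PySem.Dict.keys_empty, PySem.Set.update_nil_left]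

theorem pv_layerA_eq (relations : List (String × String)) (eo cur nxt : List String) :
    pvA_layerStep relations eo cur nxt
      = (PySem.List.sorted (PySem.Set.ofList (cur.map (pvPT relations nxt))) (pvPK nxt)
          false).flatMap
          (fun t => PySem.List.sorted (cur.filter (fun e => pvPT relations nxt e == t))
            (pvA_entityKey eo) false) := by
  unfold pvA_layerStep
  simp only [pv_ept_eq, pv_tg_eq]
  rw [PySem.List.foldl_append_eq_flatMap, List.nil_append]
  have hkeys := pv_tg_keys relations nxt cur
  set tg := cur.foldl (fun d e => d.modify (pvPT relations nxt e) [] (fun g => g ++ [e]))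
      PySem.Dict.empty with htg
  have hpk : (fun t : Option String => match t with
      | some s => (((PySem.List.index? nxt s).getD 0 : Nat) : Int)
      | none => (-1 : Int)) = pvPK nxt := by
    funext t; cases t <;> rfl
  rw [hkeys, hpk]
  refine List.flatMap_congr ?_
  intro t ht
  have htk : t ∈ tg.keys := by
    rw [hkeys]
    exact (PySem.List.mem_sorted _ _ _ t).mp ht
  have hsome : tg.get? t = some (tg.getD t []) := by
    have hc : (tg.get? t).isSome = true := by
      rw [← PySem.Dict.contains_eq_isSome_get?]
      exact (PySem.Dict.contains_iff_mem_keys tg t).mpr htk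
    cases h : tg.get? t with
    | none => rw [h] at hc; simp at hc
    | some w => rw [PySem.Dict.getD_eq_get?_getD, h]; rfl
  have hmk : PySem.Dict.mk tg.items = tg := rfl
  rw [PySem.Dict.getD_eq_get?_getD,
      pv_get?_mk_map_values (f := fun v => PySem.List.sorted v (pvA_entityKey eo) false) tg.items t,
      hmk, hsome, htg, pv_tg_getD]
  rfl

-- ---- B-side canonical forms ----

theorem pv_ordkey_eq (eo : List String) :
    (fun e => (pvB_firstIndexDict eo).getD e 999) = pvA_entityKey eo := by
  funext e
  rw [PySem.Dict.getD_eq_get?_getD, pv_firstIndex_get?]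
  unfold pvA_entityKey
  by_cases he : e ∈ eo
  · have hs : (PySem.List.index? eo e).isSome = true :=
      (PySem.List.index?_isSome_iff eo e).mpr he
    cases h : PySem.List.index? eo e with
    | none => rw [h] at hs; simp at hs
    | some k => simp [he]
  · rw [(PySem.List.index?_eq_none_iff eo e).mpr he]
    simp [he]

theorem pv_contains_firstIndex (nxt : List String) (t : String) :
    (pvB_firstIndexDict nxt).contains t = decide (t ∈ nxt) := by
  rw [PySem.Dict.contains_eq_isSome_get?, pv_firstIndex_get?]
  by_cases h : t ∈ nxt
  · obtain ⟨k, hk⟩ := Option.isSome_iff_exists.mp ((PySem.List.index?_isSome_iff nxt t).mpr h)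
    rw [hk]
    simp [h]
  · rw [(PySem.List.index?_eq_none_iff nxt t).mpr h]
    simp [h]

theorem pv_getD_firstIndex (nxt : List String) (t : String) (h : t ∈ nxt) :
    (pvB_firstIndexDict nxt).getD t 0 = ((pvNKey nxt t : Nat) : Int) := by
  rw [PySem.Dict.getD_eq_get?_getD, pv_firstIndex_get?]
  unfold pvNKey
  cases hk : PySem.List.index? nxt t with
  | none => exact absurd ((PySem.List.index?_eq_none_iff nxt t).mp hk) (by simp [h])
  | some k => simp

theorem pv_keypos_eq (relations : List (String × String)) (nxt : List String) :
    pvB_keypos (pvB_relBySrc relations) (pvB_firstIndexDict nxt)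
      = fun e => pvPK nxt (pvPT relations nxt e) := by
  funext e
  unfold pvB_keypos pvB_relBySrc
  have hrel : (relations.foldl (fun d p => d.modify p.1 [] (fun l => l ++ [p.2]))
      PySem.Dict.empty).getD e []
      = (relations.filter (fun p => p.1 == e)).map (fun p => p.2) := by
    rw [PySem.Dict.getD_foldl_modify_append, PySem.Dict.getD_empty, List.nil_append]
  have hps : (((relations.foldl (fun d p => d.modify p.1 [] (fun l => l ++ [p.2]))
        PySem.Dict.empty).getD e []).filter
          (fun t => (pvB_firstIndexDict nxt).contains t)).map
            (fun t => (pvB_firstIndexDict nxt).getD t 0)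
      = (pvT relations nxt e).map (fun t => ((pvNKey nxt t : Nat) : Int)) := by
    rw [hrel, List.filter_map, List.map_map]
    unfold pvT
    rw [List.filter_filter]
    have hpred : ∀ p : String × String,
        (((fun t => (pvB_firstIndexDict nxt).contains t) ∘ (fun p : String × String => p.2)) p
          && (p.1 == e)) = decide (p.1 = e ∧ p.2 ∈ nxt) := by
      intro p
      simp only [Function.comp_apply, pv_contains_firstIndex]
      by_cases h1 : p.1 = e <;> by_cases h2 : p.2 ∈ nxt <;> simp [h1, h2]
    rw [List.filter_congr (fun p _ => hpred p), List.map_map]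
    refine List.map_congr_left ?_
    intro p hp
    have h2 : p.2 ∈ nxt := by
      have := List.of_mem_filter hp
      simp only [decide_eq_true_eq] at this
      exact this.2
    simp [Function.comp_apply, pv_getD_firstIndex nxt p.2 h2]
  simp only [hps]
  unfold PySem.List.minD pvPT
  cases hm : PySem.List.min? (pvT relations nxt e) (pvNKey nxt) with
  | none =>
    rw [(PySem.List.min?_eq_none_iff _ _).mp hm]
    rfl
  | some m =>
    have hT : pvT relations nxt e ≠ [] := by
      intro h
      rw [h] at hm
      exact absurd hm (by simp [PySem.List.min?])
    cases hv : PySem.List.min? ((pvT relations nxt e).map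
        (fun t => ((pvNKey nxt t : Nat) : Int))) (fun x => x) with
    | none =>
      have := (PySem.List.min?_eq_none_iff _ _).mp hv
      exact absurd (List.map_eq_nil_iff.mp this) hT
    | some v =>
      have hvmem := PySem.List.min?_mem hv
      obtain ⟨y, hy, hvy⟩ := List.mem_map.mp hvmem
      have h1 : v ≤ ((pvNKey nxt m : Nat) : Int) := by
        refine PySem.List.min?_isMin hv _ ?_
        exact List.mem_map.mpr ⟨m, PySem.List.min?_mem hm, rfl⟩
      have h2 : pvNKey nxt m ≤ pvNKey nxt y := PySem.List.min?_isMin hm y hy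
      have : v = ((pvNKey nxt m : Nat) : Int) := by
        rw [← hvy] at *
        exact le_antisymm h1 (by exact_mod_cast h2)
      simp [this, pvPK]

-- ---- flatMap collapse ----

theorem pv_flatMap_eq_single {β γ : Type} (F : β → List γ) :
    ∀ (ts : List β) (t0 : β), ts.Nodup → t0 ∈ ts → (∀ t ∈ ts, t ≠ t0 → F t = []) →
    ts.flatMap F = F t0 := by
  intro ts
  induction ts with
  | nil => intro t0 _ h; simp at h
  | cons t ts ih =>
    intro t0 hn ht0 hz
    rw [List.flatMap_cons]
    by_cases h : t = t0
    · subst h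
      have : ts.flatMap F = [] := by
        rw [List.flatMap_eq_nil_iff]
        intro x hx
        exact hz x (List.mem_cons_of_mem _ hx) (fun he => (List.nodup_cons.mp hn).1 (he ▸ hx))
      rw [this, List.append_nil]
    · rw [hz t List.mem_cons_self h, List.nil_append]
      refine ih t0 (List.nodup_cons.mp hn).2 ?_ (fun x hx => hz x (List.mem_cons_of_mem _ hx))
      rcases List.mem_cons.mp ht0 with h' | h'
      · exact absurd h'.symm h
      · exact h'

-- ---- per-layer equality ----

theorem pv_PT_mem_nxt (relations : List (String × String)) (nxt : List String) (e s : String)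
    (h : pvPT relations nxt e = some s) : s ∈ nxt := by
  have hmem := PySem.List.min?_mem h
  unfold pvT at hmem
  obtain ⟨p, hp, hps⟩ := List.mem_map.mp hmem
  have := List.of_mem_filter hp
  simp only [decide_eq_true_eq] at this
  exact hps ▸ this.2

theorem pv_PK_inj (nxt : List String) (t t' : Option String)
    (h1 : ∀ s, t = some s → s ∈ nxt) (h2 : ∀ s, t' = some s → s ∈ nxt)
    (h : pvPK nxt t = pvPK nxt t') : t = t' := by
  cases t with
  | none =>
    cases t' with
    | none => rfl
    | some s' => simp only [pvPK] at h; omega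
  | some s =>
    cases t' with
    | none => simp only [pvPK] at h; omega
    | some s' =>
      simp only [pvPK, Nat.cast_inj] at h
      have hs := h1 s rfl
      have hs' := h2 s' rfl
      obtain ⟨k, hk⟩ := Option.isSome_iff_exists.mp ((PySem.List.index?_isSome_iff nxt s).mpr hs)
      obtain ⟨k', hk'⟩ := Option.isSome_iff_exists.mp ((PySem.List.index?_isSome_iff nxt s').mpr hs')
      unfold pvNKey at h
      rw [hk, hk'] at h
      simp only [Option.getD_some] at h
      obtain ⟨hlt, hget, -⟩ := PySem.List.getElem_of_index?_eq_some hk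
      obtain ⟨hlt', hget', -⟩ := PySem.List.getElem_of_index?_eq_some hk'
      subst h
      rw [← hget, ← hget']

theorem pv_keys_mem_nxt (relations : List (String × String)) (nxt cur : List String)
    (t : Option String) (ht : t ∈ PySem.Set.ofList (cur.map (pvPT relations nxt))) :
    ∀ s, t = some s → s ∈ nxt := by
  intro s hs
  subst hs
  obtain ⟨e, -, he⟩ := List.mem_map.mp ((PySem.Set.mem_ofList _ _).mp ht)
  exact pv_PT_mem_nxt relations nxt e s he

theorem pv_layerA_pairwise (relations : List (String × String)) (eo cur nxt : List String) :
    ((PySem.List.sorted (PySem.Set.ofList (cur.map (pvPT relations nxt))) (pvPK nxt)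
        false).flatMap
        (fun t => PySem.List.sorted (cur.filter (fun e => pvPT relations nxt e == t))
          (pvA_entityKey eo) false)).Pairwise
      (fun a b => (fun e => toLex (pvPK nxt (pvPT relations nxt e), pvA_entityKey eo e)) a
        ≤ (fun e => toLex (pvPK nxt (pvPT relations nxt e), pvA_entityKey eo e)) b) := by
  rw [List.pairwise_flatMap]
  constructor
  · intro t _
    refine (PySem.List.sorted_pairwise _ (pvA_entityKey eo)).imp_of_mem ?_
    intro a b ha hb hab
    have hpa : pvPT relations nxt a = t := by
      have := List.of_mem_filter ((PySem.List.mem_sorted _ _ _ a).mp ha)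
      simpa using this
    have hpb : pvPT relations nxt b = t := by
      have := List.of_mem_filter ((PySem.List.mem_sorted _ _ _ b).mp hb)
      simpa using this
    simp only [hpa, hpb]
    rw [Prod.Lex.le_iff]
    exact Or.inr ⟨rfl, hab⟩
  · have hnd : (PySem.List.sorted (PySem.Set.ofList (cur.map (pvPT relations nxt))) (pvPK nxt)
        false).Nodup :=
      (PySem.List.sorted_perm _ _ _).nodup_iff.mpr (PySem.Set.nodup_ofList _)
    refine ((PySem.List.sorted_pairwise _ (pvPK nxt)).and hnd).imp_of_mem ?_
    intro t t' ht ht' htt x hx y hy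
    have hpx : pvPT relations nxt x = t := by
      have := List.of_mem_filter ((PySem.List.mem_sorted _ _ _ x).mp hx)
      simpa using this
    have hpy : pvPT relations nxt y = t' := by
      have := List.of_mem_filter ((PySem.List.mem_sorted _ _ _ y).mp hy)
      simpa using this
    have hlt : pvPK nxt t < pvPK nxt t' := by
      refine lt_of_le_of_ne htt.1 ?_
      intro he
      exact htt.2 (pv_PK_inj nxt t t'
        (pv_keys_mem_nxt relations nxt cur t ((PySem.List.mem_sorted _ _ _ t).mp ht))
        (pv_keys_mem_nxt relations nxt cur t' ((PySem.List.mem_sorted _ _ _ t').mp ht'))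
        he)
    simp only [hpx, hpy]
    rw [Prod.Lex.le_iff]
    exact Or.inl hlt

theorem pv_layerA_filter (relations : List (String × String)) (eo cur nxt : List String)
    (c : Lex (Int × Int)) :
    ((PySem.List.sorted (PySem.Set.ofList (cur.map (pvPT relations nxt))) (pvPK nxt)
        false).flatMap
        (fun t => PySem.List.sorted (cur.filter (fun e => pvPT relations nxt e == t))
          (pvA_entityKey eo) false)).filter
      (fun y => decide (toLex (pvPK nxt (pvPT relations nxt y), pvA_entityKey eo y) = c))
      = cur.filter
          (fun y => decide (toLex (pvPK nxt (pvPT relations nxt y), pvA_entityKey eo y) = c)) := by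
  rw [List.filter_flatMap]
  set ts := PySem.List.sorted (PySem.Set.ofList (cur.map (pvPT relations nxt))) (pvPK nxt) false
    with hts
  have hcov : ∀ e ∈ cur, pvPT relations nxt e ∈ ts := by
    intro e he
    rw [hts, PySem.List.mem_sorted, PySem.Set.mem_ofList]
    exact List.mem_map_of_mem he
  have hmemn : ∀ t ∈ ts, ∀ s, t = some s → s ∈ nxt := by
    intro t ht
    exact pv_keys_mem_nxt relations nxt cur t ((PySem.List.mem_sorted _ _ _ t).mp ht)
  have hnd : ts.Nodup := (PySem.List.sorted_perm _ _ _).nodup_iff.mpr (PySem.Set.nodup_ofList _)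
  -- per-group filter
  have hgrp : ∀ t ∈ ts,
      (PySem.List.sorted (cur.filter (fun e => pvPT relations nxt e == t))
          (pvA_entityKey eo) false).filter
        (fun y => decide (toLex (pvPK nxt (pvPT relations nxt y), pvA_entityKey eo y) = c))
      = if pvPK nxt t = (ofLex c).1 then
          (cur.filter (fun e => pvPT relations nxt e == t)).filter
            (fun y => decide (pvA_entityKey eo y = (ofLex c).2))
        else [] := by
    intro t _
    have hc : ∀ y ∈ PySem.List.sorted (cur.filter (fun e => pvPT relations nxt e == t))
        (pvA_entityKey eo) false,
        decide (toLex (pvPK nxt (pvPT relations nxt y), pvA_entityKey eo y) = c)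
          = (decide (pvPK nxt t = (ofLex c).1) && decide (pvA_entityKey eo y = (ofLex c).2)) := by
      intro y hy
      have hpy : pvPT relations nxt y = t := by
        have := List.of_mem_filter ((PySem.List.mem_sorted _ _ _ y).mp hy)
        simpa using this
      rw [hpy]
      have : (toLex (pvPK nxt t, pvA_entityKey eo y) = c)
          ↔ (pvPK nxt t = (ofLex c).1 ∧ pvA_entityKey eo y = (ofLex c).2) := by
        constructor
        · intro h; rw [← h]; exact ⟨rfl, rfl⟩
        · intro ⟨h1, h2⟩
          have : ((pvPK nxt t, pvA_entityKey eo y) : Int × Int) = ofLex c := Prod.ext h1 h2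
          rw [this]
          rfl
      rw [decide_eq_decide.mpr this, Bool.decide_and]
    rw [List.filter_congr hc]
    by_cases h1 : pvPK nxt t = (ofLex c).1
    · rw [if_pos h1]
      have : ∀ y ∈ PySem.List.sorted (cur.filter (fun e => pvPT relations nxt e == t))
          (pvA_entityKey eo) false,
          (decide (pvPK nxt t = (ofLex c).1) && decide (pvA_entityKey eo y = (ofLex c).2))
            = decide (pvA_entityKey eo y = (ofLex c).2) := by
        intro y _; simp [h1]
      rw [List.filter_congr this]
      exact pv_sorted_filter _ (pvA_entityKey eo) ((ofLex c).2)
    · rw [if_neg h1]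
      rw [List.filter_eq_nil_iff]
      intro y _
      simp [h1]
  rw [List.flatMap_congr hgrp]
  have hKdec : ∀ y : String,
      decide (toLex (pvPK nxt (pvPT relations nxt y), pvA_entityKey eo y) = c)
        = (decide (pvPK nxt (pvPT relations nxt y) = (ofLex c).1)
            && decide (pvA_entityKey eo y = (ofLex c).2)) := by
    intro y
    have : (toLex (pvPK nxt (pvPT relations nxt y), pvA_entityKey eo y) = c)
        ↔ (pvPK nxt (pvPT relations nxt y) = (ofLex c).1
            ∧ pvA_entityKey eo y = (ofLex c).2) := by
      constructor
      · intro h; rw [← h]; exact ⟨rfl, rfl⟩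
      · intro ⟨h1, h2⟩
        have : ((pvPK nxt (pvPT relations nxt y), pvA_entityKey eo y) : Int × Int) = ofLex c :=
          Prod.ext h1 h2
        rw [this]
        rfl
    rw [decide_eq_decide.mpr this, Bool.decide_and]
  by_cases hex : ∃ t0 ∈ ts, pvPK nxt t0 = (ofLex c).1
  · obtain ⟨t0, ht0, hpk0⟩ := hex
    rw [pv_flatMap_eq_single _ ts t0 hnd ht0 ?_]
    swap
    · intro t ht htne
      rw [if_neg]
      intro hpk
      exact htne (pv_PK_inj nxt t t0 (hmemn t ht) (hmemn t0 ht0) (hpk.trans hpk0.symm))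
    rw [if_pos hpk0, List.filter_filter]
    rw [List.filter_congr (fun y hy => hKdec y)]
    refine (List.filter_congr ?_).symm
    intro y hy
    have hyt : decide (pvPK nxt (pvPT relations nxt y) = (ofLex c).1)
        = (pvPT relations nxt y == t0) := by
      by_cases h : pvPT relations nxt y = t0
      · simp [h, hpk0]
      · have : ¬ pvPK nxt (pvPT relations nxt y) = (ofLex c).1 := by
          intro hk
          exact h (pv_PK_inj nxt _ t0 (hmemn _ (hcov y hy)) (hmemn t0 ht0) (hk.trans hpk0.symm))
        simp [h, this]
    rw [hyt, Bool.and_comm]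
  · rw [List.flatMap_eq_nil_iff.mpr, (List.filter_eq_nil_iff).mpr]
    · intro y hy
      rw [hKdec y]
      have : ¬ pvPK nxt (pvPT relations nxt y) = (ofLex c).1 := by
        intro hk
        exact hex ⟨pvPT relations nxt y, hcov y hy, hk⟩
      simp [this]
    · intro t ht
      rw [if_neg]
      intro hk
      exact hex ⟨t, ht, hk⟩

theorem pv_layer_eq (relations : List (String × String)) (eo cur nxt : List String) :
    pvA_layerStep relations eo cur nxt
      = PySem.List.sorted2 cur (pvB_keypos (pvB_relBySrc relations) (pvB_firstIndexDict nxt))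
          (fun e => (pvB_firstIndexDict eo).getD e 999) false := by
  rw [pv_layerA_eq, pv_keypos_eq, pv_ordkey_eq, pv_sorted2_eq]
  exact pv_sorted_unique (fun e => toLex (pvPK nxt (pvPT relations nxt e), pvA_entityKey eo e))
    _ _
    (pv_layerA_pairwise relations eo cur nxt)
    (PySem.List.sorted_pairwise cur _)
    (fun c => (pv_layerA_filter relations eo cur nxt c).trans
      (pv_sorted_filter cur _ c).symm)

-- ---- assembling the whole function ----

theorem pv_pyIdx_last (n : Nat) (h : n ≠ 0) :
    PySem.List.pyIdx? n ((n : Int) - 1) = PySem.List.pyIdx? n (-1) := by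
  unfold PySem.List.pyIdx?
  rw [if_pos (by omega), if_pos (by omega), if_neg (by omega), if_pos (by omega)]
  congr 1
  omega

theorem pv_pyGetD_last {α : Type} (xs : List α) (d : α) (h : xs ≠ []) :
    PySem.List.pyGetD xs (PySem.List.len xs - 1) d = PySem.List.pyGetD xs (-1) d := by
  unfold PySem.List.pyGetD PySem.List.pyGet?
  rw [PySem.List.len_eq, pv_pyIdx_last xs.length (by simpa using h)]

theorem pv_pySetD_last {α : Type} (xs : List α) (v : α) (h : xs ≠ []) :
    PySem.List.pySetD xs (PySem.List.len xs - 1) v = PySem.List.pySetD xs (-1) v := by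
  unfold PySem.List.pySetD PySem.List.pySet?
  rw [PySem.List.len_eq, pv_pyIdx_last xs.length (by simpa using h)]

-- ===== VERDICT (by name: the statement is the Claim_ definition above) =====
theorem reorder_layers_by_cluster_spec : Claim_equal_reorder_layers_by_cluster := by
  intro layers relations eo _
  unfold Spec_reorder_layers_by_cluster reorder_layers_by_cluster reorder_layers_by_cluster_alt
  by_cases h : layers = []
  · simp [h]
  · simp only [if_neg h]
    rw [pv_pyGetD_last layers [] h, pv_pySetD_last layers _ h]
    rw [PySem.List.foldl_append_ite_eq_filter (fun e => e ∈ PySem.List.pyGetD layers (-1) []) eo []]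
    rw [List.nil_append]
    have hkept :
        (PySem.List.pyGetD layers (-1) ([] : List String)).foldl
            (fun acc entity => if entity ∉ acc then acc ++ [entity] else acc)
            (eo.filter (fun e => decide (e ∈ PySem.List.pyGetD layers (-1) [])))
          = (eo.filter (fun e => decide (e ∈ PySem.List.pyGetD layers (-1) [])))
            ++ ((PySem.List.pyGetD layers (-1) ([] : List String)).foldl
                (fun (st : PySem.Set String × List String) e =>
                  if e ∈ st.1 then st else (PySem.Set.add st.1 e, st.2 ++ [e]))
                (PySem.Set.ofList (eo.filter (fun e => decide (e ∈ PySem.List.pyGetD layers (-1) []))), [])).2 := by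
      have := pv_tail_fold (eo.filter (fun e => decide (e ∈ PySem.List.pyGetD layers (-1) [])))
        (PySem.List.pyGetD layers (-1) []) []
        (PySem.Set.ofList (eo.filter (fun e => decide (e ∈ PySem.List.pyGetD layers (-1) []))))
        (by intro x; simp [PySem.Set.mem_ofList])
      simpa using this
    rw [hkept]
    refine PySem.List.foldl_congr_mem _ _ _ _ ?_
    intro acc i _
    exact congrArg (PySem.List.pySetD acc i) (pv_layer_eq relations eo _ _)
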